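-- pv_equiv track=rewrite | github.com/oschdez97/mobility_spark | utils.py | between_ab_OR_dc
-- ===== SOURCE A (Python) =====
-- def lower_bound(elems, n):
--     low  = 0
--     high = len(elems)
--     while(low < high):
--         mid = int(low + (high - low) / 2)
--         if n <= elems[mid]:
--             high = mid
--         else:
--             low = mid + 1
--     return low
--
-- def upper_bound(elems, n):
--     low = 0
--     high = len(elems)
--     while(low < high):
--         mid = int(low + (high - low) / 2)
--         if n >= elems[mid]:
--             low = mid + 1
--         else:
--             high = mid
--     return low
--
-- def get_range(times, time_init, time_end):
--     low  = lower_bound(times, time_init)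
--     high = upper_bound(times, time_end)
--     return [low+1, high - low]
--
-- def between_ab_OR_dc(data, interval_1, interval_2):
--     code   = data[0]
--     towers = data[1]
--     times  = data[2]
--     interval_1 = get_range(times, interval_1[0], interval_1[1])
--     interval_2 = get_range(times, interval_2[0], interval_2[1])
--     zip_data = list(zip(times, towers))
--     a = zip_data[interval_1[0] - 1 : interval_1[0] + interval_1[1] - 1]
--     b = zip_data[interval_2[0] - 1 : interval_2[0] + interval_2[1] - 1]
--     res = list(set(a) | set(b))
--     res.sort()
--     towers = [x[1] for x in res]
--     times  = [x[0] for x in res]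
--     yield (code, towers, times)
-- ===== SOURCE B (Python) =====
-- def between_ab_OR_dc(data, interval_1, interval_2):
--     code, towers, times = data
--     n = len(times)
--
--     def bisect(lo, hi, pred):
--         # first index in [lo, hi) where pred(times[i]) is false
--         if lo >= hi:
--             return lo
--         mid = (lo + hi) // 2
--         if pred(times[mid]):
--             return bisect(mid + 1, hi, pred)
--         return bisect(lo, mid, pred)
--
--     def span(iv):
--         return (bisect(0, n, lambda v: v < iv[0]), bisect(0, n, lambda v: v <= iv[1]))
--
--     l1, h1 = span(interval_1)
--     l2, h2 = span(interval_2)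
--     pairs = set(zip(times[l1:h1], towers[l1:h1])) | set(zip(times[l2:h2], towers[l2:h2]))
--     res = sorted(pairs)
--     yield (code, [t for _, t in res], [tm for tm, _ in res])
-- ===== Notes on version B (the rewrite author's own statement) =====
-- stated objective: alternative
-- what changed: B replaces A's two hand-written while-loop binary searches by one generic recursive bisection helper used with two predicates, and slices times/towers directly over the found index ranges instead of materialising the full zip(times, towers) list before slicing.
import Mathlib
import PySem

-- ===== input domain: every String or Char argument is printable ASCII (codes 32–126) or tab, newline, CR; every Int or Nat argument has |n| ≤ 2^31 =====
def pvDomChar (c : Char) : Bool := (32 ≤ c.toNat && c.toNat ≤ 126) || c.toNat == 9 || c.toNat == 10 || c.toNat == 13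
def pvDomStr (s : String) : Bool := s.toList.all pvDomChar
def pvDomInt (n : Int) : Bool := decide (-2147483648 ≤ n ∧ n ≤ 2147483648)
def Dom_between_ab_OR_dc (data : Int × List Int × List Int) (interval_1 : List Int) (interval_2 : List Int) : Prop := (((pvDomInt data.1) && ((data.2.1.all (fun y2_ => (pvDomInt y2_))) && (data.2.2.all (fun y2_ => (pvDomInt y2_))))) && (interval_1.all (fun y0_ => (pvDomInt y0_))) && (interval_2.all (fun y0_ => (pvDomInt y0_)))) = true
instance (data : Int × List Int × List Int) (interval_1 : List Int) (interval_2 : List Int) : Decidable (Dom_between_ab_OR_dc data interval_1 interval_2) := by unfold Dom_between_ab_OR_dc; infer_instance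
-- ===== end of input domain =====

-- B replaces A's two hand-written while-loop binary searches by one generic recursive
-- bisection helper and slices times/towers directly over the found index ranges instead
-- of zipping the WHOLE arrays first (objective: alternative structure, same measured cost).
-- Return-value equivalence only; A is a generator, modelled as the list of its yields.

-- ===== PORT A =====
-- while-loop of lower_bound (state low, high); fuel is only a structural totality guard:
-- high - low shrinks every iteration, so fuel = elems.length + 1 is never exhausted.
-- elems[mid] is always in range when 0 ≤ low ≤ high ≤ len, so the total pyGetD form is exact there.
def lbLoop (elems : List Int) (n : Int) (fuel : Nat) (low high : Int) : Int :=
  match fuel with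
  | 0 => low
  | fuel + 1 =>
    if low < high then
      let mid := low + PySem.Int.floordiv (high - low) 2
      if n ≤ PySem.List.pyGetD elems mid 0 then lbLoop elems n fuel low mid
      else lbLoop elems n fuel (mid + 1) high
    else low

-- while-loop of upper_bound
def ubLoop (elems : List Int) (n : Int) (fuel : Nat) (low high : Int) : Int :=
  match fuel with
  | 0 => low
  | fuel + 1 =>
    if low < high then
      let mid := low + PySem.Int.floordiv (high - low) 2
      if PySem.List.pyGetD elems mid 0 ≤ n then ubLoop elems n fuel (mid + 1) high
      else ubLoop elems n fuel low mid
    else low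

def lower_bound (elems : List Int) (n : Int) : Int :=
  lbLoop elems n (elems.length + 1) 0 (elems.length : Int)

def upper_bound (elems : List Int) (n : Int) : Int :=
  ubLoop elems n (elems.length + 1) 0 (elems.length : Int)

def get_range (times : List Int) (time_init : Int) (time_end : Int) : List Int :=
  let low := lower_bound times time_init
  let high := upper_bound times time_end
  [low + 1, high - low]

def between_ab_OR_dc (data : Int × List Int × List Int) (interval_1 : List Int) (interval_2 : List Int) : List (Int × List Int × List Int) :=
  let code := data.1
  let towers := data.2.1
  let times := data.2.2
  -- interval_k[0]/[1]: in range under Pre_ (length ≥ 2), so the total pyGetD form is exact there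
  let i1 := get_range times (PySem.List.pyGetD interval_1 0 0) (PySem.List.pyGetD interval_1 1 0)
  let i2 := get_range times (PySem.List.pyGetD interval_2 0 0) (PySem.List.pyGetD interval_2 1 0)
  let zip_data := times.zip towers
  let a := PySem.List.slice zip_data (some (PySem.List.pyGetD i1 0 0 - 1)) (some (PySem.List.pyGetD i1 0 0 + PySem.List.pyGetD i1 1 0 - 1))
  let b := PySem.List.slice zip_data (some (PySem.List.pyGetD i2 0 0 - 1)) (some (PySem.List.pyGetD i2 0 0 + PySem.List.pyGetD i2 1 0 - 1))
  -- list(set(a)|set(b)) then .sort(): the sort orders the distinct pairs lexicographically,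
  -- so the pre-sort hash order of the Python set cannot affect the result; sorted2 is Python's tuple sort
  let res := PySem.List.sorted2 (PySem.Set.union (PySem.Set.ofList a) (PySem.Set.ofList b)) (fun x => x.1) (fun x => x.2) false
  let towers' := res.map (fun x => x.2)
  let times' := res.map (fun x => x.1)
  [(code, towers', times')]

-- ===== PORT B =====
-- generic bisection: first index in [lo, hi) where pred(times[i]) is false; fuel is only a
-- structural totality guard for Source B's recursion (hi - lo shrinks every call)
def bisect (times : List Int) (pred : Int → Bool) (fuel : Nat) (lo hi : Nat) : Nat :=
  match fuel with
  | 0 => lo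
  | fuel + 1 =>
    if lo < hi then
      let mid := (lo + hi) / 2
      if pred (PySem.List.pyGetD times (mid : Int) 0) then bisect times pred fuel (mid + 1) hi
      else bisect times pred fuel lo mid
    else lo

def between_ab_OR_dc_alt (data : Int × List Int × List Int) (interval_1 : List Int) (interval_2 : List Int) : List (Int × List Int × List Int) :=
  let code := data.1
  let towers := data.2.1
  let times := data.2.2
  let n := times.length
  let l1 := bisect times (fun v => v < PySem.List.pyGetD interval_1 0 0) (n + 1) 0 n
  let h1 := bisect times (fun v => v ≤ PySem.List.pyGetD interval_1 1 0) (n + 1) 0 n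
  let l2 := bisect times (fun v => v < PySem.List.pyGetD interval_2 0 0) (n + 1) 0 n
  let h2 := bisect times (fun v => v ≤ PySem.List.pyGetD interval_2 1 0) (n + 1) 0 n
  let a := (PySem.List.slice times (some (l1 : Int)) (some (h1 : Int))).zip (PySem.List.slice towers (some (l1 : Int)) (some (h1 : Int)))
  let b := (PySem.List.slice times (some (l2 : Int)) (some (h2 : Int))).zip (PySem.List.slice towers (some (l2 : Int)) (some (h2 : Int)))
  let res := PySem.List.sorted2 (PySem.Set.union (PySem.Set.ofList a) (PySem.Set.ofList b)) (fun x => x.1) (fun x => x.2) false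
  [(code, res.map (fun x => x.2), res.map (fun x => x.1))]

-- ===== PRECONDITION & SPEC =====
-- A raises IndexError on interval_1[1] / interval_2[1] when an interval list has fewer
-- than two elements; exactly those inputs are excluded (B raises there too).
def Pre_between_ab_OR_dc (data : Int × List Int × List Int) (interval_1 : List Int) (interval_2 : List Int) : Prop :=
  2 ≤ interval_1.length ∧ 2 ≤ interval_2.length
instance (data : Int × List Int × List Int) (interval_1 : List Int) (interval_2 : List Int) : Decidable (Pre_between_ab_OR_dc data interval_1 interval_2) := by unfold Pre_between_ab_OR_dc; infer_instance

def pvWitness_between_ab_OR_dc : (Int × List Int × List Int) × List Int × List Int :=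
  ((7, [1, 2, 2], [10, 20, 30]), [10, 20], [25, 30])

def Spec_between_ab_OR_dc (data : Int × List Int × List Int) (interval_1 : List Int) (interval_2 : List Int) (out : List (Int × List Int × List Int)) : Prop := out = between_ab_OR_dc_alt data interval_1 interval_2
instance (data : Int × List Int × List Int) (interval_1 : List Int) (interval_2 : List Int) (out : List (Int × List Int × List Int)) : Decidable (Spec_between_ab_OR_dc data interval_1 interval_2 out) := by unfold Spec_between_ab_OR_dc; infer_instance

-- ===== CLAIM (what is proved, stated in full; the proofs are below) =====
def Claim_equal_between_ab_OR_dc : Prop := ∀ (data : Int × List Int × List Int) (interval_1 : List Int) (interval_2 : List Int), Dom_between_ab_OR_dc data interval_1 interval_2 → Pre_between_ab_OR_dc data interval_1 interval_2 → Spec_between_ab_OR_dc data interval_1 interval_2 (between_ab_OR_dc data interval_1 interval_2)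

-- ===== LEMMAS AND PROOFS =====

-- A's lower_bound loop computes B's bisection with predicate (· < n), given adequate fuel
theorem lbLoop_eq_bisect (elems : List Int) (n : Int) (fuel : Nat) :
    ∀ (lo hi : Nat), hi - lo < fuel →
      lbLoop elems n fuel (lo : Int) (hi : Int) = ((bisect elems (fun v => decide (v < n)) fuel lo hi : Nat) : Int) := by
  induction fuel with
  | zero => intro lo hi h; omega
  | succ fuel ih =>
    intro lo hi h
    simp only [lbLoop, bisect]
    by_cases hlt : lo < hi
    · have hmid : ((lo : Int) + PySem.Int.floordiv ((hi : Int) - (lo : Int)) 2) = (((lo + hi) / 2 : Nat) : Int) := by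
        rw [PySem.Int.floordiv_eq_ediv_of_pos (by omega : (0:Int) < 2)]; omega
      simp only [hmid, show ((lo : Int) < (hi : Int)) = (lo < hi) from by simp, hlt, if_true]
      by_cases hle : n ≤ PySem.List.pyGetD elems (((lo + hi) / 2 : Nat) : Int) 0
      · simp only [hle, if_true, not_lt.mpr hle, decide_false, Bool.false_eq_true, if_false]
        exact ih lo ((lo + hi) / 2) (by omega)
      · simp only [hle, if_false, not_le.mp hle, decide_true, if_true]
        have := ih ((lo + hi) / 2 + 1) hi (by omega)
        rw [← this]; norm_num
    · simp [hlt]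

-- A's upper_bound loop computes B's bisection with predicate (· ≤ n), given adequate fuel
theorem ubLoop_eq_bisect (elems : List Int) (n : Int) (fuel : Nat) :
    ∀ (lo hi : Nat), hi - lo < fuel →
      ubLoop elems n fuel (lo : Int) (hi : Int) = ((bisect elems (fun v => decide (v ≤ n)) fuel lo hi : Nat) : Int) := by
  induction fuel with
  | zero => intro lo hi h; omega
  | succ fuel ih =>
    intro lo hi h
    simp only [ubLoop, bisect]
    by_cases hlt : lo < hi
    · have hmid : ((lo : Int) + PySem.Int.floordiv ((hi : Int) - (lo : Int)) 2) = (((lo + hi) / 2 : Nat) : Int) := by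
        rw [PySem.Int.floordiv_eq_ediv_of_pos (by omega : (0:Int) < 2)]; omega
      simp only [hmid, show ((lo : Int) < (hi : Int)) = (lo < hi) from by simp, hlt, if_true]
      by_cases hle : PySem.List.pyGetD elems (((lo + hi) / 2 : Nat) : Int) 0 ≤ n
      · simp only [hle, if_true, decide_true]
        have := ih ((lo + hi) / 2 + 1) hi (by omega)
        rw [← this]; norm_num
      · simp only [hle, if_false, decide_false, Bool.false_eq_true]
        exact ih lo ((lo + hi) / 2) (by omega)
    · simp [hlt]

theorem lower_bound_eq (elems : List Int) (n : Int) :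
    lower_bound elems n = ((bisect elems (fun v => decide (v < n)) (elems.length + 1) 0 elems.length : Nat) : Int) := by
  unfold lower_bound
  simpa using lbLoop_eq_bisect elems n (elems.length + 1) 0 elems.length (by omega)

theorem upper_bound_eq (elems : List Int) (n : Int) :
    upper_bound elems n = ((bisect elems (fun v => decide (v ≤ n)) (elems.length + 1) 0 elems.length : Nat) : Int) := by
  unfold upper_bound
  simpa using ubLoop_eq_bisect elems n (elems.length + 1) 0 elems.length (by omega)

-- slicing the zip = zipping the slices (natural bounds)
theorem slice_zip (xs ys : List Int) (l h : Nat) :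
    PySem.List.slice (xs.zip ys) (some (l : Int)) (some (h : Int)) =
      (PySem.List.slice xs (some (l : Int)) (some (h : Int))).zip (PySem.List.slice ys (some (l : Int)) (some (h : Int))) := by
  simp [PySem.List.slice_natCast, List.zip_eq_zipWith, List.take_zipWith, List.drop_zipWith]

-- A's slice of the zipped data over get_range's [low+1, high-low] encoding = B's zip of the slices
theorem sliceA (ts ws : List Int) (l h : Nat) :
    PySem.List.slice (ts.zip ws)
        (some (PySem.List.pyGetD [(l : Int) + 1, (h : Int) - (l : Int)] 0 0 - 1))
        (some (PySem.List.pyGetD [(l : Int) + 1, (h : Int) - (l : Int)] 0 0 +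
               PySem.List.pyGetD [(l : Int) + 1, (h : Int) - (l : Int)] 1 0 - 1)) =
      (PySem.List.slice ts (some (l : Int)) (some (h : Int))).zip
        (PySem.List.slice ws (some (l : Int)) (some (h : Int))) := by
  have g0 : PySem.List.pyGetD [(l : Int) + 1, (h : Int) - (l : Int)] 0 0 = (l : Int) + 1 := by
    norm_num [PySem.List.pyGetD, PySem.List.pyGet?, PySem.List.pyIdx?]
  have g1 : PySem.List.pyGetD [(l : Int) + 1, (h : Int) - (l : Int)] 1 0 = (h : Int) - (l : Int) := by
    norm_num [PySem.List.pyGetD, PySem.List.pyGet?, PySem.List.pyIdx?]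
  rw [g0, g1, show (l : Int) + 1 - 1 = (l : Int) from by ring,
    show (l : Int) + 1 + ((h : Int) - (l : Int)) - 1 = (h : Int) from by ring, slice_zip]

theorem between_ab_OR_dc_spec : Claim_equal_between_ab_OR_dc := by
  intro data interval_1 interval_2 _dom _pre
  show between_ab_OR_dc data interval_1 interval_2 = between_ab_OR_dc_alt data interval_1 interval_2
  simp only [between_ab_OR_dc, between_ab_OR_dc_alt, get_range]
  simp only [lower_bound_eq, upper_bound_eq, sliceA]
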